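-- pv_equiv track=rewrite | github.com/AP-MI-2021/lab-3-deliasusca | main.py | numar_puterea_k
-- ===== SOURCE A (Python) =====
-- def numar_puterea_k(x, k):
--     if x == 1 or k == 1:
--         return True
--     for i in range(2, int(int(x)/2)):
--         if int(x)%i == 0:
--             p = 1
--             for j in range(0,int(k)):
--                 p*=i
--             if p == x:
--                 return True
--     return False
-- ===== SOURCE B (Python) =====
-- def numar_puterea_k(x, k):
--     if x == 1 or k == 1:
--         return True
--     if x < 4 or k <= 0:
--         return False
--     bl = x.bit_length()
--     if k >= bl:
--         return False
--     # binary search for the integer k-th root of x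
--     lo, hi = 1, 2 ** (bl // k + 1)
--     while hi - lo > 1:
--         mid = (lo + hi) // 2
--         if mid ** k <= x:
--             lo = mid
--         else:
--             hi = mid
--     return lo ** k == x
-- ===== Notes on version B (the rewrite author's own statement) =====
-- stated objective: faster
-- what changed: Replaces the trial loop over all candidate bases up to x/2 (with an inner multiplication loop of k steps) by a binary search for the integer k-th root followed by a single power check.
-- intended difference: On the single input (x=4, k=2) A returns False because its loop bound range(2, int(x/2)) excludes the base 2, while B returns True, which is intended since 4 = 2**2 is a perfect square. — e.g. on numar_puterea_k(4, 2): A returns false, B returns true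
import Mathlib
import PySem

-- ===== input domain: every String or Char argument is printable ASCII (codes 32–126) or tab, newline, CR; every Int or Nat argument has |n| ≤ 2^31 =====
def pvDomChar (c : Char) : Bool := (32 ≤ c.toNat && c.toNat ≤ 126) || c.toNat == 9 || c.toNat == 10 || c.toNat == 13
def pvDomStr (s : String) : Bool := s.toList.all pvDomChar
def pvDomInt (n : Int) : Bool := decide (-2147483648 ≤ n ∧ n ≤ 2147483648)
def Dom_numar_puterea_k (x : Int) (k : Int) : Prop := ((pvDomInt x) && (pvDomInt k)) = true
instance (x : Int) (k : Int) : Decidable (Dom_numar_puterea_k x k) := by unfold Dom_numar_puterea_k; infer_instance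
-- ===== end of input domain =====

-- B replaces A's O(x*k) trial loop by a binary search for the integer k-th root (faster in a timing run);
-- A and B agree everywhere except (4,2), where A's loop bound int(x/2) wrongly excludes the base 2 (see D_ below).

-- ===== PORT A =====
-- int(int(x)/2): true division then int() truncates toward zero = Int.tdiv (exact: |x| ≤ 2^31, so x/2 is an exact float);
-- the early-return for-loop is List.any; the inner 'for j in range(0,int(k)): p *= i' is a foldl over pyRange 0 k 1.
def numar_puterea_k (x : Int) (k : Int) : Bool :=
  if x = 1 ∨ k = 1 then true
  else
    (PySem.List.pyRange 2 (Int.tdiv x 2) 1).any fun i =>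
      (PySem.Int.mod x i == 0) &&
        (((PySem.List.pyRange 0 k 1).foldl (fun p _ => p * i) 1) == x)

-- ===== PORT B =====
-- the while-loop of Source B; x, k, lo, hi are all positive there, so Python's //, ** are Nat's / and ^ (exact)
def pvBisect (x k lo hi : Nat) : Nat :=
  if hi - lo > 1 then
    if ((lo + hi) / 2) ^ k ≤ x then pvBisect x k ((lo + hi) / 2) hi
    else pvBisect x k lo ((lo + hi) / 2)
  else lo
termination_by hi - lo
decreasing_by all_goals omega

-- after the first two guards x ≥ 4 and k ≥ 2, so the Python ints x, k are carried as x.toNat, k.toNat (exact);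
-- x.bit_length() is PySem.Int.bitLength
def numar_puterea_k_alt (x : Int) (k : Int) : Bool :=
  if x = 1 ∨ k = 1 then true
  else if x < 4 ∨ k ≤ 0 then false
  else
    let bl := PySem.Int.bitLength x
    if k.toNat ≥ bl then false
    else
      let lo := pvBisect x.toNat k.toNat 1 (2 ^ (bl / k.toNat + 1))
      lo ^ k.toNat == x.toNat

-- ===== PRECONDITION & SPEC =====
-- On (x=4, k=2) A returns False because range(2, int(x/2)) is empty and excludes the base 2; B returns True,
-- the intended value since 4 = 2**2.
def D_numar_puterea_k (x : Int) (k : Int) : Prop := x = 4 ∧ k = 2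
instance (x : Int) (k : Int) : Decidable (D_numar_puterea_k x k) := by unfold D_numar_puterea_k; infer_instance
def Spec_numar_puterea_k (x : Int) (k : Int) (out : Bool) : Prop := ¬ D_numar_puterea_k x k → out = numar_puterea_k_alt x k
instance (x : Int) (k : Int) (out : Bool) : Decidable (Spec_numar_puterea_k x k out) := by unfold Spec_numar_puterea_k; infer_instance
def pvDiffWitness_numar_puterea_k : Int × Int := (4, 2)
def pvDiffWitnessOut_numar_puterea_k : Bool × Bool := (false, true)

-- ===== CLAIM (what is proved, stated in full; the proofs are below) =====
def Claim_unchanged_numar_puterea_k : Prop := ∀ (x : Int) (k : Int), Dom_numar_puterea_k x k → Spec_numar_puterea_k x k (numar_puterea_k x k)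
def Claim_changed_numar_puterea_k : Prop := Dom_numar_puterea_k (pvDiffWitness_numar_puterea_k.1) (pvDiffWitness_numar_puterea_k.2) ∧ D_numar_puterea_k (pvDiffWitness_numar_puterea_k.1) (pvDiffWitness_numar_puterea_k.2) ∧ numar_puterea_k (pvDiffWitness_numar_puterea_k.1) (pvDiffWitness_numar_puterea_k.2) = pvDiffWitnessOut_numar_puterea_k.1 ∧ numar_puterea_k_alt (pvDiffWitness_numar_puterea_k.1) (pvDiffWitness_numar_puterea_k.2) = pvDiffWitnessOut_numar_puterea_k.2 ∧ pvDiffWitnessOut_numar_puterea_k.1 ≠ pvDiffWitnessOut_numar_puterea_k.2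
def Claim_exact_numar_puterea_k : Prop := ∀ (x : Int) (k : Int), Dom_numar_puterea_k x k → D_numar_puterea_k x k → numar_puterea_k x k ≠ numar_puterea_k_alt x k

-- ===== LEMMAS AND PROOFS =====

-- "x is a perfect k-th power with a base ≥ 2", on Nat
def pvIsPow (xn kn : Nat) : Prop := ∃ r : Nat, 2 ≤ r ∧ r ^ kn = xn

theorem pv_foldl_mul_pow (i : Int) (l : List Int) (p : Int) :
    l.foldl (fun p _ => p * i) p = p * i ^ l.length := by
  induction l generalizing p with
  | nil => simp
  | cons a t ih => simp [List.foldl, ih, pow_succ]; ring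

-- A's loop condition, unfolded
theorem pv_A_true_iff (x k : Int) (h1 : ¬ (x = 1 ∨ k = 1)) :
    numar_puterea_k x k = true ↔
      ∃ i : Int, 2 ≤ i ∧ i < Int.tdiv x 2 ∧ PySem.Int.mod x i = 0 ∧ i ^ k.toNat = x := by
  simp only [numar_puterea_k, if_neg h1, List.any_eq_true, PySem.List.mem_pyRange_one,
    Bool.and_eq_true, beq_iff_eq, pv_foldl_mul_pow, one_mul, PySem.List.length_pyRange_one]
  constructor
  · rintro ⟨i, ⟨h2, hlt⟩, hm, hp⟩
    exact ⟨i, h2, hlt, hm, by simpa using hp⟩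
  · rintro ⟨i, h2, hlt, hm, hp⟩
    exact ⟨i, ⟨h2, hlt⟩, hm, by simpa using hp⟩

theorem pv_tdiv_pos_bound (x i : Int) (h2 : 2 ≤ i) (h : i < Int.tdiv x 2) : 0 < x ∧ 2 * i + 2 ≤ x := by
  rw [Int.tdiv_eq_ediv] at h
  have hs : (2:Int).sign = 1 := rfl
  split_ifs at h with hc
  · rcases hc with hc | ⟨c, rfl⟩ <;> omega
  · omega

theorem pv_key_ineq (r kn : Nat) (hr : 2 ≤ r) (hk : 2 ≤ kn) (hne : ¬ (r = 2 ∧ kn = 2)) :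
    2 * r + 2 ≤ r ^ kn := by
  by_cases h2 : r = 2
  · subst h2
    have hk3 : 3 ≤ kn := by omega
    calc 2 * 2 + 2 ≤ 2 ^ 3 := by norm_num
    _ ≤ 2 ^ kn := Nat.pow_le_pow_right (by norm_num) hk3
  · have hr3 : 3 ≤ r := by omega
    calc 2 * r + 2 ≤ r * r := by nlinarith
    _ = r ^ 2 := by ring
    _ ≤ r ^ kn := Nat.pow_le_pow_right (by omega) hk

theorem pv_bisect_spec (x k : Nat) (lo hi : Nat) (hlo : lo ^ k ≤ x) (hhi : x < hi ^ k)
    (hlt : lo < hi) : (pvBisect x k lo hi) ^ k ≤ x ∧ x < (pvBisect x k lo hi + 1) ^ k := by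
  induction lo, hi using pvBisect.induct x k with
  | case1 lo hi hgap hmid ih =>
    rw [pvBisect.eq_def, if_pos hgap, if_pos hmid]
    exact ih hmid hhi (by omega)
  | case2 lo hi hgap hmid ih =>
    rw [pvBisect.eq_def, if_pos hgap, if_neg hmid]
    exact ih hlo (by omega) (by omega)
  | case3 lo hi hgap =>
    rw [pvBisect.eq_def, if_neg hgap]
    have : hi = lo + 1 := by omega
    subst this
    exact ⟨hlo, hhi⟩

-- A = pvIsPow on the main region
theorem pv_A_iff (x k : Int) (hx : 4 ≤ x) (hk : 2 ≤ k) (hD : ¬ (x = 4 ∧ k = 2)) :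
    numar_puterea_k x k = true ↔ pvIsPow x.toNat k.toNat := by
  rw [pv_A_true_iff x k (by omega)]
  have hxt : ((x.toNat : Int)) = x := by omega
  constructor
  · rintro ⟨i, h2, hlt, hmod, hpow⟩
    refine ⟨i.toNat, by omega, ?_⟩
    have hi : (i.toNat : Int) = i := by omega
    have hInt : ((i.toNat : Int)) ^ k.toNat = ((x.toNat : Int)) := by rw [hi, hxt]; exact hpow
    exact_mod_cast hInt
  · rintro ⟨r, hr2, hrk⟩
    have hkn2 : 2 ≤ k.toNat := by omega
    have hne : ¬ (r = 2 ∧ k.toNat = 2) := by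
      rintro ⟨rfl, hk2⟩
      apply hD
      refine ⟨?_, by omega⟩
      have h4 : (2:Nat) ^ k.toNat = x.toNat := hrk
      rw [hk2] at h4
      omega
    have hineq : 2 * r + 2 ≤ x.toNat := by
      rw [← hrk]; exact pv_key_ineq r k.toNat hr2 hkn2 hne
    refine ⟨(r : Int), by exact_mod_cast hr2, ?_, ?_, ?_⟩
    · rw [Int.tdiv_eq_ediv_of_nonneg (by omega)]
      omega
    · rw [PySem.Int.mod_eq_zero_iff_dvd, ← hxt, ← hrk]
      push_cast
      exact dvd_pow_self _ (by omega)
    · rw [← hxt, ← hrk]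
      push_cast
      ring

-- B = pvIsPow on the main region
theorem pv_B_iff (x k : Int) (hx : 4 ≤ x) (hk : 2 ≤ k) :
    numar_puterea_k_alt x k = true ↔ pvIsPow x.toNat k.toNat := by
  unfold numar_puterea_k_alt
  rw [if_neg (by omega), if_neg (by omega)]
  have hxa : x.natAbs = x.toNat := by omega
  have hlt2 : x.toNat < 2 ^ PySem.Int.bitLength x := by
    rw [← hxa]; exact PySem.Int.lt_two_pow_bitLength x
  by_cases hbl : k.toNat ≥ PySem.Int.bitLength x
  · rw [if_pos hbl]
    simp only [Bool.false_eq_true, false_iff]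
    rintro ⟨r, hr2, hrk⟩
    have h1 : (2:Nat) ^ PySem.Int.bitLength x ≤ 2 ^ k.toNat := Nat.pow_le_pow_right (by norm_num) hbl
    have h2 : (2:Nat) ^ k.toNat ≤ r ^ k.toNat := Nat.pow_le_pow_left hr2 _
    omega
  · rw [if_neg hbl]
    push_neg at hbl
    have hkn0 : k.toNat ≠ 0 := by omega
    have h2k : 2 ^ k.toNat ≤ x.toNat := by
      have h1 : (2:Nat) ^ k.toNat ≤ 2 ^ (PySem.Int.bitLength x - 1) :=
        Nat.pow_le_pow_right (by norm_num) (by omega)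
      have h2 := PySem.Int.two_pow_bitLength_le x (by omega)
      omega
    have hhi : x.toNat < (2 ^ (PySem.Int.bitLength x / k.toNat + 1)) ^ k.toNat := by
      rw [← pow_mul]
      have hmul : PySem.Int.bitLength x < (PySem.Int.bitLength x / k.toNat + 1) * k.toNat := by
        have := Nat.div_add_mod (PySem.Int.bitLength x) k.toNat
        have := Nat.mod_lt (PySem.Int.bitLength x) (show 0 < k.toNat by omega)
        nlinarith [Nat.div_add_mod (PySem.Int.bitLength x) k.toNat]
      calc x.toNat < 2 ^ PySem.Int.bitLength x := hlt2
      _ ≤ 2 ^ ((PySem.Int.bitLength x / k.toNat + 1) * k.toNat) := Nat.pow_le_pow_right (by norm_num) (by omega)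
    have hlt1 : 1 < 2 ^ (PySem.Int.bitLength x / k.toNat + 1) := Nat.one_lt_two_pow_iff.mpr (Nat.succ_ne_zero _)
    obtain ⟨hL, hR⟩ := pv_bisect_spec x.toNat k.toNat 1 (2 ^ (PySem.Int.bitLength x / k.toNat + 1))
      (by simpa using (show 1 ≤ x.toNat by omega)) hhi hlt1
    rw [beq_iff_eq]
    constructor
    · intro heq
      refine ⟨pvBisect x.toNat k.toNat 1 (2 ^ (PySem.Int.bitLength x / k.toNat + 1)), ?_, heq⟩
      by_contra hc
      push_neg at hc
      have : (pvBisect x.toNat k.toNat 1 (2 ^ (PySem.Int.bitLength x / k.toNat + 1)) + 1) ^ k.toNat ≤ 2 ^ k.toNat :=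
        Nat.pow_le_pow_left (by omega) _
      omega
    · rintro ⟨r, hr2, hrk⟩
      have hrle : r ≤ pvBisect x.toNat k.toNat 1 (2 ^ (PySem.Int.bitLength x / k.toNat + 1)) := by
        by_contra hc
        push_neg at hc
        have : (pvBisect x.toNat k.toNat 1 (2 ^ (PySem.Int.bitLength x / k.toNat + 1)) + 1) ^ k.toNat ≤ r ^ k.toNat :=
          Nat.pow_le_pow_left (by omega) _
        omega
      have hler : pvBisect x.toNat k.toNat 1 (2 ^ (PySem.Int.bitLength x / k.toNat + 1)) ≤ r := by
        by_contra hc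
        push_neg at hc
        have h1 : r ^ k.toNat < (r + 1) ^ k.toNat := Nat.pow_lt_pow_left (by omega) hkn0
        have h2 : (r + 1) ^ k.toNat ≤ (pvBisect x.toNat k.toNat 1 (2 ^ (PySem.Int.bitLength x / k.toNat + 1))) ^ k.toNat :=
          Nat.pow_le_pow_left (by omega) _
        omega
      have : r = pvBisect x.toNat k.toNat 1 (2 ^ (PySem.Int.bitLength x / k.toNat + 1)) := by omega
      rw [← this]
      exact hrk

theorem pv_alt_42 : numar_puterea_k_alt 4 2 = true := by
  have hbl : PySem.Int.bitLength 4 = 3 := by decide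
  have hb : pvBisect 4 2 1 4 = 2 := by
    rw [pvBisect.eq_def]; norm_num
    rw [pvBisect.eq_def]; norm_num
    rw [pvBisect.eq_def]; norm_num
  unfold numar_puterea_k_alt
  simp only [show Int.toNat 4 = 4 from rfl, show Int.toNat 2 = 2 from rfl, hbl]
  norm_num [hb]

-- ===== VERDICT (by name: the statement is the Claim_ definition above) =====
theorem numar_puterea_k_spec : Claim_unchanged_numar_puterea_k := by
  intro x k hDom hD
  by_cases h1 : x = 1 ∨ k = 1
  · simp [numar_puterea_k, numar_puterea_k_alt, h1]
  · by_cases h2 : x < 4 ∨ k ≤ 0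
    · have hA : numar_puterea_k x k = false := by
        rw [← Bool.not_eq_true, pv_A_true_iff x k h1]
        rintro ⟨i, hi2, hlt, hmod, hpow⟩
        obtain ⟨hxpos, hbound⟩ := pv_tdiv_pos_bound x i hi2 hlt
        rcases h2 with h2 | h2
        · omega
        · have hk0 : k.toNat = 0 := by omega
          rw [hk0, pow_zero] at hpow
          omega
      have hB : numar_puterea_k_alt x k = false := by
        unfold numar_puterea_k_alt
        rw [if_neg h1, if_pos h2]
      rw [hA, hB]
    · push_neg at h1 h2
      have hx : 4 ≤ x := by omega
      have hk : 2 ≤ k := by omega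
      have hD' : ¬ (x = 4 ∧ k = 2) := by
        unfold D_numar_puterea_k at hD; exact hD
      rw [Bool.eq_iff_iff, pv_A_iff x k hx hk hD', pv_B_iff x k hx hk]

theorem numar_puterea_k_changed : Claim_changed_numar_puterea_k := by
  unfold Claim_changed_numar_puterea_k
  exact ⟨by decide, by decide, by decide, pv_alt_42, by decide⟩

theorem numar_puterea_k_tight : Claim_exact_numar_puterea_k := by
  intro x k _ hD
  obtain ⟨hx, hk⟩ := hD
  subst hx; subst hk
  rw [pv_alt_42]
  decide
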